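-- pv_equiv track=rewrite | github.com/yk4r2/kaggle_competitions | jpx/adhoc/cpcv.py | cpcv_split
-- ===== SOURCE A (Python) =====
-- from itertools import combinations
--
-- def cpcv_split(
--     folds: int = 5,
--     test_folds: int = 3,
--     start_embargo: bool = True,
-- ) -> dict:
--     if test_folds > folds:
--         raise ValueError("Test folds count should be smaller than overall folds.")
--     test_variants = list(combinations(range(folds), test_folds))
--
--     splits = []
--     for test_parts in test_variants:
--         train_parts = list(set(range(folds)).difference(test_parts))
--         parts = {k: "test" for k in test_parts}
--
--         if start_embargo:
--             parts[-1] = "embargo"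
--         parts.update({k: "train" for k in train_parts})
--
--         # embargo adding
--         parts.update({k - 0.5: "embargo" for k in test_parts})
--         parts.update({k + 0.5: "embargo" for k in test_parts})
--
--         parts = dict(sorted(parts.items(), key=lambda item: item[0]))
--         # reindex
--         parts = {k: v for k, v in zip(range(len(parts)), parts.values())}
--
--         purged_elements = []
--         if parts[0] == "embargo" and parts[1] == "embargo":
--             purged_elements = [0, 1] if parts[2] == "embargo" else [0]
--
--         left = 0
--         while left < len(parts) - 2:
--             if (
--                 parts[left] == "test"
--                 and parts[left + 1] == "embargo"
--                 and parts[left + 2] == "test"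
--             ):
--                 purged_elements.append(left + 1)
--                 left += 1
--             left += 1
--
--         if parts[len(parts) - 1] == "embargo":
--             purged_elements.append(len(parts) - 1)
--
--         parts = {k: parts[k] for k in range(len(parts)) if k not in purged_elements}
--         # reindex
--         parts = {k: v for k, v in zip(range(len(parts)), parts.values())}
--         splits.append(parts)
--     return splits
-- ===== SOURCE B (Python) =====
-- from itertools import combinations
--
--
-- def cpcv_split(
--     folds: int = 5,
--     test_folds: int = 3,
--     start_embargo: bool = True,
-- ) -> dict:
--     if test_folds > folds:
--         raise ValueError("Test folds count should be smaller than overall folds.")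
--     splits = []
--     for test_parts in combinations(range(folds), test_folds):
--         tests = set(test_parts)
--         labels = ["embargo"] if (start_embargo or 0 in tests) else []
--         for j in range(folds):
--             if j > 0 and ((j - 1 in tests) != (j in tests)):
--                 labels.append("embargo")
--             labels.append("test" if j in tests else "train")
--         splits.append(dict(enumerate(labels)))
--     return splits
-- ===== Notes on version B (the rewrite author's own statement) =====
-- stated objective: simpler
-- what changed: Replaces the fractional-key dict + sort + reindex + three purge passes by a single direct pass that emits each fold's label and one 'embargo' exactly between a test fold and a train fold (XOR of neighbouring membership), with a single leading 'embargo' when start_embargo or fold 0 is a test fold; no purge step is needed.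
import Mathlib
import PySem

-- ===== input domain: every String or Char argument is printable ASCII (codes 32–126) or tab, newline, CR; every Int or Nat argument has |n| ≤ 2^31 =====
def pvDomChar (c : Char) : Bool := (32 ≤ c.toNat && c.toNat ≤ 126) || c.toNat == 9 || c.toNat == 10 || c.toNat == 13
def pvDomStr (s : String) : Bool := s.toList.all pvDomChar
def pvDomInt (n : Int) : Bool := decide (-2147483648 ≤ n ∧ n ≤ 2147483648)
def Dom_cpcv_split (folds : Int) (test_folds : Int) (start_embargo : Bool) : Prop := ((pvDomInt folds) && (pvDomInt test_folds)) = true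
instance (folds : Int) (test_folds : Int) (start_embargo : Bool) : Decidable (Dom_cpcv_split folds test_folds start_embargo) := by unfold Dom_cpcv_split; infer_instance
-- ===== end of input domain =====

-- B replaces A's fractional-key dict + sort + reindex + purge passes by one direct pass
-- emitting labels with an 'embargo' exactly between a test and a train fold (simpler, not measured faster).


-- ===== PORT A =====

-- itertools.combinations(l, r), lexicographic order (shared by both ports: both Pythons call it)
def pvCombos : List Int → Nat → List (List Int)
  | _, 0 => [[]]
  | [], _ + 1 => []
  | x :: xs, r + 1 => (pvCombos xs r).map (x :: ·) ++ pvCombos xs (r + 1)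

-- the while-loop of A's purge phase (left index, accumulator purged_elements)
def pvPurgeLoop (vals : List String) (left : Nat) (acc : List Nat) : List Nat :=
  if left + 2 < vals.length then
    if vals.getD left "" == "test" && vals.getD (left + 1) "" == "embargo"
        && vals.getD (left + 2) "" == "test" then
      pvPurgeLoop vals (left + 2) (acc ++ [left + 1])
    else pvPurgeLoop vals (left + 1) acc
  else acc
termination_by vals.length - left

-- one combination's dict build + sort + reindex + purge + reindex.
-- Python's keys k, -1, k-0.5, k+0.5 are half-integers; they are represented EXACTLY,
-- order- and equality-preserving, as the doubled integer keys 2k, -2, 2k-1, 2k+1.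
-- CPython iterates set(range(folds)).difference(test_parts) ascending for these small ints
-- (and the iteration order is irrelevant anyway once the dict is sorted by key).
-- After the first reindex the dict has keys 0..n-1, so parts[i] is vals.getD i ""
-- (all lookups hit existing keys under Pre_; KeyError cases are outside Pre_).
def pvPartsA (folds : Int) (se : Bool) (c : List Int) : List (Int × String) :=
  let train := (PySem.List.pyRange 0 folds 1).filter (fun j => !c.contains j)
  let d : PySem.Dict Int String := c.foldl (fun d k => d.insert (2*k) "test") PySem.Dict.empty
  let d := if se then d.insert (-2) "embargo" else d
  let d := train.foldl (fun d k => d.insert (2*k) "train") d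
  let d := c.foldl (fun d k => d.insert (2*k - 1) "embargo") d
  let d := c.foldl (fun d k => d.insert (2*k + 1) "embargo") d
  let vals := (PySem.List.sorted d.items (fun p => p.1) false).map (fun p => p.2)
  let purged : List Nat :=
    if vals.getD 0 "" == "embargo" && vals.getD 1 "" == "embargo" then
      (if vals.getD 2 "" == "embargo" then [0, 1] else [0])
    else []
  let purged := pvPurgeLoop vals 0 purged
  let purged := if vals.getD (vals.length - 1) "" == "embargo" then purged ++ [vals.length - 1] else purged
  let keep := ((List.range vals.length).filter (fun k => !purged.contains k)).map (fun k => vals.getD k "")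
  PySem.List.enumerate keep 0

-- raise ValueError (test_folds > folds, and combinations' ValueError for test_folds < 0
-- hidden in .toNat) is outside Pre_; the port returns [] there.
def cpcv_split (folds : Int) (test_folds : Int) (start_embargo : Bool) : List (List (Int × String)) :=
  if test_folds > folds then []
  else (pvCombos (PySem.List.pyRange 0 folds 1) test_folds.toNat).map (pvPartsA folds start_embargo)

-- ===== PORT B =====

-- one pass: leading embargo iff start_embargo or fold 0 is a test fold; between folds
-- an embargo iff exactly one of the two neighbouring folds is a test fold.
def pvPartsB (folds : Int) (se : Bool) (c : List Int) : List (Int × String) :=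
  let lead := if se || c.contains 0 then ["embargo"] else []
  let labels := (PySem.List.pyRange 0 folds 1).foldl (fun acc j =>
      acc ++ ((if decide (0 < j) && (c.contains (j-1) != c.contains j) then ["embargo"] else []) ++
        [if c.contains j then "test" else "train"])) lead
  PySem.List.enumerate labels 0

def cpcv_split_alt (folds : Int) (test_folds : Int) (start_embargo : Bool) : List (List (Int × String)) :=
  if test_folds > folds then []
  else (pvCombos (PySem.List.pyRange 0 folds 1) test_folds.toNat).map (pvPartsB folds start_embargo)

-- ===== PRECONDITION & SPEC =====
-- exactly the inputs on which Python A returns: A raises ValueError for test_folds > folds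
-- or test_folds < 0, and KeyError for folds ≤ 0 (degenerate empty split).
def Pre_cpcv_split (folds : Int) (test_folds : Int) (start_embargo : Bool) : Prop :=
  1 ≤ folds ∧ 0 ≤ test_folds ∧ test_folds ≤ folds
instance (folds : Int) (test_folds : Int) (start_embargo : Bool) : Decidable (Pre_cpcv_split folds test_folds start_embargo) := by unfold Pre_cpcv_split; infer_instance

def pvWitness_cpcv_split : Int × Int × Bool := (4, 2, true)

def Spec_cpcv_split (folds : Int) (test_folds : Int) (start_embargo : Bool) (out : List (List (Int × String))) : Prop := out = cpcv_split_alt folds test_folds start_embargo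
instance (folds : Int) (test_folds : Int) (start_embargo : Bool) (out : List (List (Int × String))) : Decidable (Spec_cpcv_split folds test_folds start_embargo out) := by unfold Spec_cpcv_split; infer_instance

-- ===== CLAIM (what is proved, stated in full; the proofs are below) =====
def Claim_equal_cpcv_split : Prop := ∀ (folds : Int) (test_folds : Int) (start_embargo : Bool), Dom_cpcv_split folds test_folds start_embargo → Pre_cpcv_split folds test_folds start_embargo → Spec_cpcv_split folds test_folds start_embargo (cpcv_split folds test_folds start_embargo)

-- ===== LEMMAS AND PROOFS =====

-- canonical per-combination objects used by the proof
def pvLbl (c : List Int) (j : Int) : String := if c.contains j then "test" else "train"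
def pvSep (c : List Int) (j : Int) : Bool := c.contains j || c.contains (j - 1)

-- sorted key-value sequence of A's dict from position a on (trailing embargo in the base case)
def pvLseq (f : Int) (c : List Int) (a : Int) : List (Int × String) :=
  if a < f then
    ((if pvSep c a then [(2*a - 1, "embargo")] else []) ++ [(2*a, pvLbl c a)]) ++ pvLseq f c (a + 1)
  else (if c.contains (f - 1) && a == f then [(2*f - 1, "embargo")] else [])
termination_by (f - a).toNat
decreasing_by omega

def pvVseq (f : Int) (c : List Int) (a : Int) : List String := (pvLseq f c a).map Prod.snd

-- B's label emission from fold a on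
def pvGq (f : Int) (c : List Int) (a : Int) : List String :=
  if a < f then
    (if c.contains (a - 1) != c.contains a then ["embargo"] else []) ++
      pvLbl c a :: pvGq f c (a + 1)
  else []
termination_by (f - a).toNat
decreasing_by omega

-- structural window-purge: drops an 'embargo' between two 'test's and a trailing 'embargo'
def pvWp (prev : String) : List String → List String
  | [] => []
  | [x] => if x == "embargo" then [] else [x]
  | x :: y :: r =>
    (if prev == "test" && x == "embargo" && y == "test" then [] else [x]) ++ pvWp x (y :: r)

-- the items of A's dict, in insertion order
def pvI (f : Int) (se : Bool) (c : List Int) : List (Int × String) :=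
  c.map (fun k => (2*k, "test")) ++ (if se then [((-2 : Int), "embargo")] else []) ++
  ((PySem.List.pyRange 0 f 1).filter (fun j => !c.contains j)).map (fun j => (2*j, "train")) ++
  c.map (fun k => (2*k - 1, "embargo")) ++
  (c.filter (fun k => !c.contains (k + 1))).map (fun k => (2*k + 1, "embargo"))

theorem pvCombos_sublist : ∀ (l : List Int) (r : Nat) (c : List Int), c ∈ pvCombos l r → c.Sublist l := by
  intro l
  induction l with
  | nil =>
    intro r c hc
    cases r with
    | zero => simp [pvCombos] at hc; simp [hc]
    | succ r => simp [pvCombos] at hc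
  | cons x xs ih =>
    intro r c hc
    cases r with
    | zero => simp [pvCombos] at hc; simp [hc]
    | succ r =>
      simp only [pvCombos, List.mem_append, List.mem_map] at hc
      rcases hc with ⟨c', hc', rfl⟩ | hc
      · exact List.Sublist.cons₂ x (ih r c' hc')
      · exact List.Sublist.cons x (ih (r+1) c hc)

-- a dict-insert whose key is already bound to the same value is a no-op
theorem pv_insert_mem_eq (d : PySem.Dict Int String) (k : Int) (v : String)
    (hnd : d.keys.Nodup) (hmem : (k, v) ∈ d.items) : d.insert k v = d := by
  apply PySem.Dict.ext
  have hcont : d.contains k = true :=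
    (PySem.Dict.contains_iff_mem_keys d k).2 (PySem.Dict.mem_keys_of_mem_items d hmem)
  rw [PySem.Dict.items_insert_of_contains d v hcont]
  conv_rhs => rw [← List.map_id d.items]
  apply List.map_congr_left
  intro p hp
  by_cases hk : p.1 = k
  · have h1 : d.get? k = some v := PySem.Dict.get?_of_mem_items d hmem hnd
    have h2 : d.get? p.1 = some p.2 := PySem.Dict.get?_of_mem_items d (by simpa using hp) hnd
    rw [hk, h1] at h2
    have : p = (k, v) := by
      obtain ⟨p1, p2⟩ := p
      simp only at hk
      simp only [Option.some.injEq] at h2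
      simp [hk, ← h2]
    simp [hk, this]
  · simp [hk]

-- items of a same-value insert loop: fresh keys append, already-bound keys are no-ops
theorem pv_foldl_insert (v : String) (key : Int → Int) :
    ∀ (rem : List Int) (d : PySem.Dict Int String),
    d.keys.Nodup → (rem.map key).Nodup →
    (∀ k ∈ rem, d.contains (key k) = true → (key k, v) ∈ d.items) →
    (rem.foldl (fun d k => d.insert (key k) v) d).items
      = d.items ++ (rem.filter (fun k => !d.contains (key k))).map (fun k => (key k, v)) := by
  intro rem
  induction rem with
  | nil => intro d _ _ _; simp
  | cons k rem ih =>
    intro d hnd hkeys hmem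
    simp only [List.map_cons, List.nodup_cons] at hkeys
    by_cases hcont : d.contains (key k) = true
    · have heq : d.insert (key k) v = d :=
        pv_insert_mem_eq d (key k) v hnd (hmem k (by simp) hcont)
      simp only [List.foldl_cons, heq, List.filter_cons, hcont]
      rw [ih d hnd hkeys.2 (fun k' hk' => hmem k' (by simp [hk']))]
      simp
    · have hcf : d.contains (key k) = false := by simpa using hcont
      have hitems : (d.insert (key k) v).items = d.items ++ [(key k, v)] :=
        PySem.Dict.items_insert_of_not_contains d v hcf
      have hnd' : (d.insert (key k) v).keys.Nodup := PySem.Dict.nodup_keys_insert _ _ _ hnd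
      have hcs : ∀ k' ∈ rem, (d.insert (key k) v).contains (key k') = d.contains (key k') := by
        intro k' hk'
        have hne : key k' ≠ key k := by
          intro h; exact hkeys.1 (h ▸ List.mem_map_of_mem hk')
        rw [PySem.Dict.contains_insert]
        simp [hne]
      simp only [List.foldl_cons]
      rw [ih (d.insert (key k) v) hnd' hkeys.2 ?hm]
      case hm =>
        intro k' hk' hc
        rw [hcs k' hk'] at hc
        rw [hitems]
        exact List.mem_append_left _ (hmem k' (by simp [hk']) hc)
      rw [hitems, List.filter_congr (fun k' hk' => by rw [hcs k' hk'])]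
      simp [List.filter_cons, hcf]

-- pvWp keeps a non-embargo element and recurses
theorem pvWp_keep (prev x : String) (hx : (x == "embargo") = false) (T : List String) :
    pvWp prev (x :: T) = x :: pvWp x T := by
  cases T with
  | nil => simp [pvWp, hx]
  | cons y r => simp [pvWp, hx]

theorem pvPurgeLoop_mem (vals : List String) :
    ∀ (left : Nat) (acc : List Nat) (i : Nat),
    i ∈ pvPurgeLoop vals left acc ↔
      i ∈ acc ∨ ∃ j, left ≤ j ∧ j + 2 < vals.length ∧ vals.getD j "" = "test" ∧
        vals.getD (j+1) "" = "embargo" ∧ vals.getD (j+2) "" = "test" ∧ i = j + 1 := by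
  intro left acc
  induction left, acc using pvPurgeLoop.induct vals with
  | case1 left acc hlt hwin ih =>
    intro i
    rw [pvPurgeLoop, if_pos hlt, if_pos hwin, ih]
    simp only [Bool.and_eq_true, beq_iff_eq] at hwin
    constructor
    · rintro (h | ⟨j, hj, h2, h3, h4, h5, rfl⟩)
      · rcases List.mem_append.1 h with h | h
        · exact Or.inl h
        · exact Or.inr ⟨left, by omega, hlt, hwin.1.1, hwin.1.2, hwin.2, by simpa using h⟩
      · exact Or.inr ⟨j, by omega, h2, h3, h4, h5, rfl⟩
    · rintro (h | ⟨j, hj, h2, h3, h4, h5, rfl⟩)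
      · exact Or.inl (List.mem_append_left _ h)
      · rcases Nat.lt_or_ge j (left + 2) with hj2 | hj2
        · -- j = left or j = left + 1; left+1 is impossible (its value is "embargo")
          rcases Nat.eq_or_lt_of_le hj with rfl | hj3
          · exact Or.inl (List.mem_append_right _ (by simp))
          · have : j = left + 1 := by omega
            subst this
            rw [hwin.1.2] at h3
            simp at h3
        · exact Or.inr ⟨j, hj2, h2, h3, h4, h5, rfl⟩
  | case2 left acc hlt hwin ih =>
    intro i
    rw [pvPurgeLoop, if_pos hlt, if_neg hwin, ih]
    constructor
    · rintro (h | ⟨j, hj, h2, h3, h4, h5, rfl⟩)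
      · exact Or.inl h
      · exact Or.inr ⟨j, by omega, h2, h3, h4, h5, rfl⟩
    · rintro (h | ⟨j, hj, h2, h3, h4, h5, rfl⟩)
      · exact Or.inl h
      · rcases Nat.eq_or_lt_of_le hj with heq | hj3
        · exfalso
          apply hwin
          rw [← heq] at h3 h4 h5
          simp only [Bool.and_eq_true, beq_iff_eq]
          exact ⟨⟨h3, h4⟩, h5⟩
        · exact Or.inr ⟨j, by omega, h2, h3, h4, h5, rfl⟩
  | case3 left acc hge =>
    intro i
    rw [pvPurgeLoop, if_neg hge]
    constructor
    · exact Or.inl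
    · rintro (h | ⟨j, hj, h2, _⟩)
      · exact h
      · omega



theorem pv_foldl_insert_fresh (v : String) (key : Int → Int)
    (rem : List Int) (d : PySem.Dict Int String)
    (hnd : d.keys.Nodup) (hknd : (rem.map key).Nodup)
    (hfresh : ∀ k ∈ rem, d.contains (key k) = false) :
    (rem.foldl (fun d k => d.insert (key k) v) d).items
      = d.items ++ rem.map (fun k => (key k, v)) := by
  rw [pv_foldl_insert v key rem d hnd hknd
      (fun k hk hc => absurd hc (by simp [hfresh k hk]))]
  congr 1
  have : List.filter (fun k => !d.contains (key k)) rem = rem :=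
    List.filter_eq_self.2 (fun k hk => by simp [hfresh k hk])
  rw [this]

theorem pv_mem_keys_iff (d : PySem.Dict Int String) (x : Int) :
    x ∈ d.keys ↔ ∃ p ∈ d.items, p.1 = x := by
  simp [PySem.Dict.keys]

theorem pv_stage234 (f : Int) (c : List Int) (hnd : c.Nodup) (hb : ∀ k ∈ c, 0 ≤ k ∧ k < f)
    (d1 : PySem.Dict Int String)
    (hnd1 : d1.keys.Nodup)
    (hkm1 : ∀ x : Int, x ∈ d1.keys → ((∃ k ∈ c, 2*k = x) ∨ x = -2)) :
    (c.foldl (fun d k => d.insert (2*k + 1) "embargo")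
      (c.foldl (fun d k => d.insert (2*k - 1) "embargo")
        (((PySem.List.pyRange 0 f 1).filter (fun j => !c.contains j)).foldl
            (fun d k => d.insert (2*k) "train") d1))).items
    = d1.items ++ ((PySem.List.pyRange 0 f 1).filter (fun j => !c.contains j)).map (fun j => (2*j, "train"))
      ++ c.map (fun k => (2*k - 1, "embargo"))
      ++ (c.filter (fun k => !c.contains (k + 1))).map (fun k => (2*k + 1, "embargo")) := by
  have hinj2 : Function.Injective (fun k : Int => 2*k) := fun a b h => by
    have h' : 2*a = 2*b := h; omega
  have hinjm : Function.Injective (fun k : Int => 2*k - 1) := fun a b h => by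
    have h' : 2*a - 1 = 2*b - 1 := h; omega
  have hinjp : Function.Injective (fun k : Int => 2*k + 1) := fun a b h => by
    have h' : 2*a + 1 = 2*b + 1 := h; omega
  set train := (PySem.List.pyRange 0 f 1).filter (fun j => !c.contains j) with htrain
  have htrndn : train.Nodup := (PySem.List.nodup_pyRange_one 0 f).filter _
  have htrmem : ∀ j ∈ train, (0 ≤ j ∧ j < f) ∧ j ∉ c := by
    intro j hj
    rw [htrain, List.mem_filter] at hj
    refine ⟨PySem.List.mem_pyRange_one.1 hj.1, ?_⟩
    simpa using hj.2
  -- stage 2: train keys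
  have h2 : (train.foldl (fun d k => d.insert (2*k) "train") d1).items
      = d1.items ++ train.map (fun j => (2*j, "train")) := by
    have := pv_foldl_insert_fresh "train" (fun k => 2*k) train d1 hnd1 (htrndn.map hinj2) ?fr
    · exact this
    case fr =>
      intro j hj
      rw [← Bool.not_eq_true, PySem.Dict.contains_iff_mem_keys]
      show ¬ (2*j ∈ d1.keys)
      intro hmem
      rcases hkm1 _ hmem with ⟨k, hk, e⟩ | e
      · have : j = k := by omega
        exact (htrmem j hj).2 (this ▸ hk)
      · have := (htrmem j hj).1.1; omega
  set d2 := train.foldl (fun d k => d.insert (2*k) "train") d1 with hd2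
  have hkm2 : ∀ x : Int, x ∈ d2.keys →
      ((∃ k ∈ c, 2*k = x) ∨ x = -2 ∨ (∃ j ∈ train, 2*j = x)) := by
    intro x hx
    obtain ⟨p, hp, rfl⟩ := (pv_mem_keys_iff d2 x).1 hx
    rw [h2] at hp
    rcases List.mem_append.1 hp with hp | hp
    · rcases hkm1 _ (PySem.Dict.mem_keys_of_mem_items d1 hp) with h | h
      · exact Or.inl h
      · exact Or.inr (Or.inl h)
    · obtain ⟨j, hj, rfl⟩ := List.mem_map.1 hp
      exact Or.inr (Or.inr ⟨j, hj, rfl⟩)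
  have hnd2 : d2.keys.Nodup := by
    have : d2.keys = d1.keys ++ train.map (fun j => 2*j) := by
      simp [PySem.Dict.keys, h2, List.map_map, Function.comp_def]
    rw [this, List.nodup_append]
    refine ⟨hnd1, by simpa using htrndn.map hinj2, ?_⟩
    intro x hx y hy
    obtain ⟨j, hj, e⟩ := List.mem_map.1 hy
    have e' : 2*j = y := e
    intro hxy
    subst hxy
    rcases hkm1 _ hx with ⟨k, hk, e2⟩ | e2
    · have : j = k := by omega
      exact (htrmem j hj).2 (this ▸ hk)
    · have := (htrmem j hj).1.1; omega
  -- stage 3: left embargo keys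
  have h3 : (c.foldl (fun d k => d.insert (2*k - 1) "embargo") d2).items
      = d2.items ++ c.map (fun k => (2*k - 1, "embargo")) := by
    have := pv_foldl_insert_fresh "embargo" (fun k => 2*k - 1) c d2 hnd2 (hnd.map hinjm) ?fr
    · exact this
    case fr =>
      intro k hk
      rw [← Bool.not_eq_true, PySem.Dict.contains_iff_mem_keys]
      show ¬ (2*k - 1 ∈ d2.keys)
      intro hmem
      rcases hkm2 _ hmem with ⟨k', _, e⟩ | e | ⟨j, _, e⟩ <;> omega
  set d3 := c.foldl (fun d k => d.insert (2*k - 1) "embargo") d2 with hd3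
  have hkm3 : ∀ x : Int, x ∈ d3.keys →
      ((∃ k ∈ c, 2*k = x) ∨ x = -2 ∨ (∃ j ∈ train, 2*j = x) ∨ (∃ k ∈ c, 2*k - 1 = x)) := by
    intro x hx
    obtain ⟨p, hp, rfl⟩ := (pv_mem_keys_iff d3 x).1 hx
    rw [h3] at hp
    rcases List.mem_append.1 hp with hp | hp
    · rcases hkm2 _ (PySem.Dict.mem_keys_of_mem_items d2 hp) with h | h | h
      · exact Or.inl h
      · exact Or.inr (Or.inl h)
      · exact Or.inr (Or.inr (Or.inl h))
    · obtain ⟨k, hk, rfl⟩ := List.mem_map.1 hp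
      exact Or.inr (Or.inr (Or.inr ⟨k, hk, rfl⟩))
  have hnd3 : d3.keys.Nodup := by
    have hkeq : d3.keys = d2.keys ++ c.map (fun k => 2*k - 1) := by
      simp [PySem.Dict.keys, h3, List.map_map, Function.comp_def]
    rw [hkeq, List.nodup_append]
    refine ⟨hnd2, by simpa using hnd.map hinjm, ?_⟩
    intro x hx y hy
    obtain ⟨k, hk, e⟩ := List.mem_map.1 hy
    have e' : 2*k - 1 = y := e
    intro hxy
    subst hxy
    rcases hkm2 _ hx with ⟨k', _, e2⟩ | e2 | ⟨j, _, e2⟩ <;> omega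
  -- stage 4: right embargo keys
  have hd3mem : ∀ k ∈ c, (k + 1) ∈ c → (2*k + 1, "embargo") ∈ d3.items := by
    intro k _ hk1
    rw [h3]
    refine List.mem_append_right _ (List.mem_map.2 ⟨k + 1, hk1, ?_⟩)
    rw [Prod.mk.injEq]
    exact ⟨by omega, rfl⟩
  have hd3not : ∀ k ∈ c, (k + 1) ∉ c → d3.contains (2*k + 1) = false := by
    intro k hk hk1
    rw [← Bool.not_eq_true, PySem.Dict.contains_iff_mem_keys]
    intro hmem
    rcases hkm3 _ hmem with ⟨k', hk', e⟩ | e | ⟨j, hj, e⟩ | ⟨k', hk', e⟩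
    · omega
    · omega
    · omega
    · have hke : k' = k + 1 := by omega
      exact hk1 (hke ▸ hk')
  have hcong : c.filter (fun k => !d3.contains (2*k + 1)) = c.filter (fun k => !c.contains (k + 1)) := by
    apply List.filter_congr
    intro k hk
    congr 1
    by_cases hk1 : (k + 1) ∈ c
    · have hc1 : d3.contains (2*k + 1) = true :=
        (PySem.Dict.contains_iff_mem_keys d3 _).2 (PySem.Dict.mem_keys_of_mem_items d3 (hd3mem k hk hk1))
      have hc2 : c.contains (k + 1) = true := by simpa using hk1
      rw [hc1, hc2]
    · have hc2 : c.contains (k + 1) = false := by simpa using hk1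
      rw [hd3not k hk hk1, hc2]
  have hm : ∀ k ∈ c, d3.contains ((fun k => 2*k + 1) k) = true → ((fun k => 2*k + 1) k, "embargo") ∈ d3.items := by
    intro k hk hcont
    have hcont' : d3.contains (2*k + 1) = true := hcont
    by_cases hk1 : (k + 1) ∈ c
    · exact hd3mem k hk hk1
    · rw [hd3not k hk hk1] at hcont'
      simp at hcont'
  have h4 := pv_foldl_insert "embargo" (fun k => 2*k + 1) c d3 hnd3 (hnd.map hinjp) hm
  simp only at h4
  rw [h4, hcong, h3, h2]

theorem pv_d4_items (f : Int) (se : Bool) (c : List Int)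
    (hnd : c.Nodup) (hb : ∀ k ∈ c, 0 ≤ k ∧ k < f) :
    (c.foldl (fun d k => d.insert (2*k + 1) "embargo")
      (c.foldl (fun d k => d.insert (2*k - 1) "embargo")
        (((PySem.List.pyRange 0 f 1).filter (fun j => !c.contains j)).foldl
            (fun d k => d.insert (2*k) "train")
          (if se then
            (c.foldl (fun d k => d.insert (2*k) "test")
              (PySem.Dict.empty : PySem.Dict Int String)).insert (-2) "embargo"
           else c.foldl (fun d k => d.insert (2*k) "test") PySem.Dict.empty)))).items
    = pvI f se c := by
  have hinj2 : Function.Injective (fun k : Int => 2*k) := fun a b h => by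
    have h' : 2*a = 2*b := h; omega
  have h0 : (c.foldl (fun d k => d.insert (2*k) "test") (PySem.Dict.empty : PySem.Dict Int String)).items
      = c.map (fun k => (2*k, "test")) := by
    have := pv_foldl_insert_fresh "test" (fun k => 2*k) c PySem.Dict.empty
      (by simp) (hnd.map hinj2) (by intro k _; simp)
    simpa using this
  have hkm0 : ∀ x : Int, x ∈ (c.foldl (fun d k => d.insert (2*k) "test") (PySem.Dict.empty : PySem.Dict Int String)).keys
      → (∃ k ∈ c, 2*k = x) := by
    intro x hx
    obtain ⟨p, hp, rfl⟩ := (pv_mem_keys_iff _ x).1 hx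
    rw [h0] at hp
    obtain ⟨k, hk, rfl⟩ := List.mem_map.1 hp
    exact ⟨k, hk, rfl⟩
  have hnd0 : (c.foldl (fun d k => d.insert (2*k) "test") (PySem.Dict.empty : PySem.Dict Int String)).keys.Nodup := by
    have : (c.foldl (fun d k => d.insert (2*k) "test") (PySem.Dict.empty : PySem.Dict Int String)).keys
        = c.map (fun k => 2*k) := by
      simp [PySem.Dict.keys, h0, List.map_map, Function.comp_def]
    rw [this]
    exact hnd.map hinj2
  cases se with
  | false =>
    simp only [Bool.false_eq_true, ↓reduceIte]
    rw [pv_stage234 f c hnd hb _ hnd0 (fun x hx => Or.inl (hkm0 x hx)), h0]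
    simp [pvI, List.append_assoc]
  | true =>
    simp only [↓reduceIte]
    have hc : (c.foldl (fun d k => d.insert (2*k) "test") (PySem.Dict.empty : PySem.Dict Int String)).contains (-2) = false := by
      rw [← Bool.not_eq_true, PySem.Dict.contains_iff_mem_keys]
      intro hmem
      obtain ⟨k, hk, e⟩ := hkm0 _ hmem
      have := (hb k hk).1
      omega
    have h1 : ((c.foldl (fun d k => d.insert (2*k) "test") (PySem.Dict.empty : PySem.Dict Int String)).insert (-2) "embargo").items
        = c.map (fun k => (2*k, "test")) ++ [((-2 : Int), "embargo")] := by
      rw [PySem.Dict.items_insert_of_not_contains _ "embargo" hc, h0]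
    have hkm1 : ∀ x : Int, x ∈ ((c.foldl (fun d k => d.insert (2*k) "test") (PySem.Dict.empty : PySem.Dict Int String)).insert (-2) "embargo").keys
        → ((∃ k ∈ c, 2*k = x) ∨ x = -2) := by
      intro x hx
      obtain ⟨p, hp, rfl⟩ := (pv_mem_keys_iff _ x).1 hx
      rw [h1] at hp
      rcases List.mem_append.1 hp with hp | hp
      · obtain ⟨k, hk, rfl⟩ := List.mem_map.1 hp
        exact Or.inl ⟨k, hk, rfl⟩
      · rw [List.mem_singleton] at hp
        subst hp
        exact Or.inr rfl
    have hnd1 : ((c.foldl (fun d k => d.insert (2*k) "test") (PySem.Dict.empty : PySem.Dict Int String)).insert (-2) "embargo").keys.Nodup :=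
      PySem.Dict.nodup_keys_insert _ _ _ hnd0
    rw [pv_stage234 f c hnd hb _ hnd1 hkm1, h1]
    simp [pvI, List.append_assoc]


theorem pvLseq_base (f : Int) (c : List Int) (a : Int) (h : ¬ a < f) :
    pvLseq f c a = (if c.contains (f - 1) && a == f then [(2*f - 1, "embargo")] else []) := by
  rw [pvLseq, if_neg h]

theorem pvLseq_key_lb (f : Int) (c : List Int) :
    ∀ (n : Nat) (a : Int), (f - a).toNat = n → ∀ p ∈ pvLseq f c a, 2*a - 1 ≤ p.1 := by
  intro n
  induction n with
  | zero =>
    intro a ha p hp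
    rw [pvLseq_base f c a (by omega)] at hp
    split at hp
    · next hg =>
      simp only [Bool.and_eq_true, beq_iff_eq] at hg
      rw [List.mem_singleton] at hp
      subst hp
      simp only
      omega
    · simp at hp
  | succ n ih =>
    intro a ha p hp
    by_cases hf : a < f
    · rw [pvLseq, if_pos hf] at hp
      rcases List.mem_append.1 hp with hp | hp
      · rcases List.mem_append.1 hp with hp | hp
        · split at hp
          · rw [List.mem_singleton] at hp
            subst hp
            simp only
            omega
          · simp at hp
        · rw [List.mem_singleton] at hp
          subst hp
          simp only
          omega
      · have := ih (a + 1) (by omega) p hp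
        omega
    · rw [pvLseq_base f c a hf] at hp
      split at hp
      · next hg =>
        simp only [Bool.and_eq_true, beq_iff_eq] at hg
        rw [List.mem_singleton] at hp
        subst hp
        simp only
        omega
      · simp at hp

theorem pvLseq_pairwise (f : Int) (c : List Int) :
    ∀ (n : Nat) (a : Int), (f - a).toNat = n →
    (pvLseq f c a).Pairwise (fun p q => p.1 < q.1) := by
  intro n
  induction n with
  | zero =>
    intro a ha
    rw [pvLseq_base f c a (by omega)]
    split <;> simp
  | succ n ih =>
    intro a ha
    by_cases hf : a < f
    · rw [pvLseq, if_pos hf]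
      rw [List.pairwise_append]
      refine ⟨?_, ih (a + 1) (by omega), ?_⟩
      · rw [List.pairwise_append]
        refine ⟨by split <;> simp, by simp, ?_⟩
        intro p hp q hq
        split at hp
        · rw [List.mem_singleton] at hp
          rw [List.mem_singleton] at hq
          subst hp; subst hq
          simp only
          omega
        · simp at hp
      · intro p hp q hq
        have hq' := pvLseq_key_lb f c (f - (a+1)).toNat (a + 1) rfl q hq
        rcases List.mem_append.1 hp with hp | hp
        · split at hp
          · rw [List.mem_singleton] at hp
            subst hp
            simp only
            omega
          · simp at hp
        · rw [List.mem_singleton] at hp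
          subst hp
          simp only
          omega
    · rw [pvLseq_base f c a hf]
      split <;> simp

theorem pvLseq_mem (f : Int) (c : List Int) :
    ∀ (n : Nat) (a : Int), (f - a).toNat = n → ∀ p : Int × String,
    (p ∈ pvLseq f c a ↔
      ((∃ j : Int, a ≤ j ∧ j < f ∧ ((pvSep c j = true ∧ p = (2*j - 1, "embargo")) ∨ p = (2*j, pvLbl c j)))
        ∨ (a ≤ f ∧ c.contains (f - 1) = true ∧ p = (2*f - 1, "embargo")))) := by
  intro n
  induction n with
  | zero =>
    intro a ha p
    rw [pvLseq_base f c a (by omega)]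
    constructor
    · intro hp
      split at hp
      · next hg =>
        simp only [Bool.and_eq_true, beq_iff_eq] at hg
        rw [List.mem_singleton] at hp
        exact Or.inr ⟨by omega, hg.1, hp⟩
      · simp at hp
    · rintro (⟨j, hj1, hj2, _⟩ | ⟨h1, h2, rfl⟩)
      · omega
      · have haf : a = f := by omega
        rw [if_pos (by rw [h2, haf]; simp)]
        simp
  | succ n ih =>
    intro a ha p
    by_cases hf : a < f
    · rw [pvLseq, if_pos hf, List.mem_append, List.mem_append, ih (a + 1) (by omega) p]
      constructor
      · rintro ((hp | hp) | (⟨j, hj1, hj2, hd⟩ | htr))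
        · split at hp
          · next hsep =>
            rw [List.mem_singleton] at hp
            exact Or.inl ⟨a, le_refl a, hf, Or.inl ⟨hsep, hp⟩⟩
          · simp at hp
        · rw [List.mem_singleton] at hp
          exact Or.inl ⟨a, le_refl a, hf, Or.inr hp⟩
        · exact Or.inl ⟨j, by omega, hj2, hd⟩
        · exact Or.inr ⟨by omega, htr.2.1, htr.2.2⟩
      · rintro (⟨j, hj1, hj2, hd⟩ | ⟨h1, h2, h3⟩)
        · rcases eq_or_lt_of_le hj1 with rfl | hj3
          · rcases hd with ⟨hsep, rfl⟩ | rfl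
            · exact Or.inl (Or.inl (by rw [if_pos hsep]; simp))
            · exact Or.inl (Or.inr (by simp))
          · exact Or.inr (Or.inl ⟨j, by omega, hj2, hd⟩)
        · exact Or.inr (Or.inr ⟨by omega, h2, h3⟩)
    · omega

theorem pv_mem_I_iff (f : Int) (se : Bool) (c : List Int)
    (hb : ∀ k ∈ c, 0 ≤ k ∧ k < f) (p : Int × String) :
    p ∈ pvI f se c ↔ p ∈ ((if se then [((-2 : Int), "embargo")] else []) ++ pvLseq f c 0) := by
  have hcm : ∀ x : Int, c.contains x = true ↔ x ∈ c := by intro x; simp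
  rw [List.mem_append, pvLseq_mem f c (f - 0).toNat 0 rfl p]
  have hI : p ∈ pvI f se c ↔
      (p ∈ c.map (fun k => (2*k, "test")) ∨ p ∈ (if se then [((-2 : Int), "embargo")] else []) ∨
       p ∈ ((PySem.List.pyRange 0 f 1).filter (fun j => !c.contains j)).map (fun j => (2*j, "train")) ∨
       p ∈ c.map (fun k => (2*k - 1, "embargo")) ∨
       p ∈ (c.filter (fun k => !c.contains (k + 1))).map (fun k => (2*k + 1, "embargo"))) := by
    simp only [pvI, List.mem_append, or_assoc]
  rw [hI]
  constructor
  · rintro (hp | hp | hp | hp | hp)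
    · obtain ⟨k, hk, rfl⟩ := List.mem_map.1 hp
      refine Or.inr (Or.inl ⟨k, (hb k hk).1, (hb k hk).2, Or.inr ?_⟩)
      rw [Prod.mk.injEq]
      exact ⟨rfl, by rw [pvLbl, if_pos ((hcm k).2 hk)]⟩
    · exact Or.inl hp
    · obtain ⟨j, hj, rfl⟩ := List.mem_map.1 hp
      rw [List.mem_filter] at hj
      have hjb := PySem.List.mem_pyRange_one.1 hj.1
      have hjc : j ∉ c := by simpa using hj.2
      refine Or.inr (Or.inl ⟨j, hjb.1, hjb.2, Or.inr ?_⟩)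
      rw [Prod.mk.injEq]
      exact ⟨rfl, by rw [pvLbl, if_neg (by simpa using hjc)]⟩
    · obtain ⟨k, hk, rfl⟩ := List.mem_map.1 hp
      refine Or.inr (Or.inl ⟨k, (hb k hk).1, (hb k hk).2, Or.inl ⟨?_, rfl⟩⟩)
      rw [pvSep, Bool.or_eq_true]
      exact Or.inl ((hcm k).2 hk)
    · obtain ⟨k, hk, rfl⟩ := List.mem_map.1 hp
      rw [List.mem_filter] at hk
      have hk1 : (k + 1) ∉ c := by simpa using hk.2
      have hkc := hk.1
      by_cases hkf : k + 1 < f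
      · refine Or.inr (Or.inl ⟨k + 1, by have := (hb k hkc).1; omega, hkf, Or.inl ⟨?_, ?_⟩⟩)
        · rw [pvSep, Bool.or_eq_true]
          exact Or.inr (by simpa using (hcm k).2 hkc)
        · rw [Prod.mk.injEq]
          exact ⟨by omega, rfl⟩
      · have hkf' : k + 1 = f := by have := (hb k hkc).2; omega
        refine Or.inr (Or.inr ⟨by have h1 := (hb k hkc).1; have h2 := (hb k hkc).2; omega, ?_, ?_⟩)
        · exact (hcm (f - 1)).2 (by rw [show f - 1 = k from by omega]; exact hkc)
        · rw [Prod.mk.injEq]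
          exact ⟨by omega, rfl⟩
  · rintro (hp | ⟨j, hj0, hjf, hd | hd⟩ | ⟨_, hfc, rfl⟩)
    · exact Or.inr (Or.inl hp)
    · -- separator entry (2j-1, embargo)
      obtain ⟨hsep, rfl⟩ := hd
      rw [pvSep, Bool.or_eq_true, hcm, hcm] at hsep
      by_cases hjc : j ∈ c
      · exact Or.inr (Or.inr (Or.inr (Or.inl (List.mem_map.2 ⟨j, hjc, rfl⟩))))
      · have hjm : j - 1 ∈ c := by
          rcases hsep with h | h
          · exact absurd h hjc
          · exact h
        refine Or.inr (Or.inr (Or.inr (Or.inr (List.mem_map.2 ⟨j - 1, ?_, ?_⟩))))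
        · rw [List.mem_filter]
          refine ⟨hjm, ?_⟩
          have he : j - 1 + 1 = j := by omega
          rw [he]
          simpa using hjc
        · rw [Prod.mk.injEq]
          exact ⟨by omega, rfl⟩
    · -- label entry (2j, lbl j)
      subst hd
      by_cases hjc : j ∈ c
      · refine Or.inl (List.mem_map.2 ⟨j, hjc, ?_⟩)
        rw [Prod.mk.injEq]
        exact ⟨rfl, by rw [pvLbl, if_pos ((hcm j).2 hjc)]⟩
      · refine Or.inr (Or.inr (Or.inl (List.mem_map.2 ⟨j, ?_, ?_⟩)))
        · rw [List.mem_filter]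
          exact ⟨PySem.List.mem_pyRange_one.2 ⟨hj0, hjf⟩, by simpa using hjc⟩
        · rw [Prod.mk.injEq]
          exact ⟨rfl, by rw [pvLbl, if_neg (by simpa using hjc)]⟩
    · -- trailing entry
      have hfc' : (f - 1) ∈ c := (hcm (f - 1)).1 hfc
      refine Or.inr (Or.inr (Or.inr (Or.inr (List.mem_map.2 ⟨f - 1, ?_, ?_⟩))))
      · rw [List.mem_filter]
        refine ⟨hfc', ?_⟩
        have : f - 1 + 1 ∉ c := by
          intro hmem
          have := (hb _ hmem).2
          omega
        simpa using this
      · rw [Prod.mk.injEq]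
        exact ⟨by omega, rfl⟩

theorem pv_nodup_append_pairs (l1 l2 : List (Int × String)) (h1 : l1.Nodup) (h2 : l2.Nodup)
    (hd : ∀ p ∈ l1, ∀ q ∈ l2, p.1 ≠ q.1) : (l1 ++ l2).Nodup := by
  rw [List.nodup_append]
  exact ⟨h1, h2, fun p hp q hq he => hd p hp q hq (by rw [he])⟩

theorem pvI_nodup (f : Int) (se : Bool) (c : List Int)
    (hnd : c.Nodup) (hb : ∀ k ∈ c, 0 ≤ k ∧ k < f) : (pvI f se c).Nodup := by
  have hmap : ∀ (g : Int → Int) (s : String) (l : List Int), l.Nodup → Function.Injective g →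
      (l.map (fun k => (g k, s))).Nodup := by
    intro g s l hl hg
    exact hl.map (fun a b h => hg (congrArg Prod.fst h))
  have hinj2 : Function.Injective (fun k : Int => 2*k) := fun a b h => by
    have h' : 2*a = 2*b := h; omega
  have hinjm : Function.Injective (fun k : Int => 2*k - 1) := fun a b h => by
    have h' : 2*a - 1 = 2*b - 1 := h; omega
  have hinjp : Function.Injective (fun k : Int => 2*k + 1) := fun a b h => by
    have h' : 2*a + 1 = 2*b + 1 := h; omega
  have htrndn : ((PySem.List.pyRange 0 f 1).filter (fun j => !c.contains j)).Nodup :=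
    (PySem.List.nodup_pyRange_one 0 f).filter _
  have k1 : ∀ p ∈ c.map (fun k => (2*k, "test")), ∃ k ∈ c, p.1 = 2*k := by
    intro p hp
    obtain ⟨k, hk, rfl⟩ := List.mem_map.1 hp
    exact ⟨k, hk, rfl⟩
  have k2 : ∀ p ∈ (if se then [((-2 : Int), "embargo")] else []), p.1 = -2 := by
    intro p hp
    split at hp
    · rw [List.mem_singleton] at hp; subst hp; rfl
    · simp at hp
  have k3 : ∀ p ∈ ((PySem.List.pyRange 0 f 1).filter (fun j => !c.contains j)).map (fun j => (2*j, "train")),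
      ∃ j : Int, 0 ≤ j ∧ j ∉ c ∧ p.1 = 2*j := by
    intro p hp
    obtain ⟨j, hj, rfl⟩ := List.mem_map.1 hp
    rw [List.mem_filter] at hj
    exact ⟨j, (PySem.List.mem_pyRange_one.1 hj.1).1, by simpa using hj.2, rfl⟩
  have k4 : ∀ p ∈ c.map (fun k => (2*k - 1, "embargo")), ∃ k ∈ c, p.1 = 2*k - 1 := by
    intro p hp
    obtain ⟨k, hk, rfl⟩ := List.mem_map.1 hp
    exact ⟨k, hk, rfl⟩
  have k5 : ∀ p ∈ (c.filter (fun k => !c.contains (k + 1))).map (fun k => (2*k + 1, "embargo")),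
      ∃ k : Int, k ∈ c ∧ (k + 1) ∉ c ∧ p.1 = 2*k + 1 := by
    intro p hp
    obtain ⟨k, hk, rfl⟩ := List.mem_map.1 hp
    rw [List.mem_filter] at hk
    exact ⟨k, hk.1, by simpa using hk.2, rfl⟩
  rw [pvI]
  have n12 : (c.map (fun k => (2*k, "test")) ++ (if se then [((-2 : Int), "embargo")] else [])).Nodup := by
    apply pv_nodup_append_pairs _ _ (hmap _ _ _ hnd hinj2) (by split <;> simp)
    intro p hp q hq
    obtain ⟨k, hk, he⟩ := k1 p hp
    rw [he, k2 q hq]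
    have := (hb k hk).1
    omega
  have n123 : ((c.map (fun k => (2*k, "test")) ++ (if se then [((-2 : Int), "embargo")] else [])) ++
      ((PySem.List.pyRange 0 f 1).filter (fun j => !c.contains j)).map (fun j => (2*j, "train"))).Nodup := by
    apply pv_nodup_append_pairs _ _ n12 (hmap _ _ _ htrndn hinj2)
    intro p hp q hq
    obtain ⟨j, hj0, hjc, hqe⟩ := k3 q hq
    rcases List.mem_append.1 hp with hp | hp
    · obtain ⟨k, hk, he⟩ := k1 p hp
      rw [he, hqe]
      intro heq
      have : k = j := by omega
      exact hjc (this ▸ hk)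
    · rw [k2 p hp, hqe]
      omega
  have n1234 : (((c.map (fun k => (2*k, "test")) ++ (if se then [((-2 : Int), "embargo")] else [])) ++
      ((PySem.List.pyRange 0 f 1).filter (fun j => !c.contains j)).map (fun j => (2*j, "train"))) ++
      c.map (fun k => (2*k - 1, "embargo"))).Nodup := by
    apply pv_nodup_append_pairs _ _ n123 (hmap _ _ _ hnd hinjm)
    intro p hp q hq
    obtain ⟨k', hk', hqe⟩ := k4 q hq
    rw [hqe]
    rcases List.mem_append.1 hp with hp | hp
    · rcases List.mem_append.1 hp with hp | hp
      · obtain ⟨k, hk, he⟩ := k1 p hp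
        rw [he]; omega
      · rw [k2 p hp]; omega
    · obtain ⟨j, hj0, hjc, he⟩ := k3 p hp
      rw [he]; omega
  apply pv_nodup_append_pairs _ _ n1234 (hmap _ _ _ (hnd.filter _) hinjp)
  intro p hp q hq
  obtain ⟨k', hk', hk1', hqe⟩ := k5 q hq
  rw [hqe]
  rcases List.mem_append.1 hp with hp | hp
  · rcases List.mem_append.1 hp with hp | hp
    · rcases List.mem_append.1 hp with hp | hp
      · obtain ⟨k, hk, he⟩ := k1 p hp
        rw [he]; omega
      · rw [k2 p hp]
        have := (hb k' hk').1
        omega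
    · obtain ⟨j, hj0, hjc, he⟩ := k3 p hp
      rw [he]; omega
  · obtain ⟨k, hk, he⟩ := k4 p hp
    rw [he]
    intro heq
    have : k = k' + 1 := by omega
    exact hk1' (this ▸ hk)

theorem pvL_nodup (f : Int) (se : Bool) (c : List Int)
    (hb : ∀ k ∈ c, 0 ≤ k ∧ k < f) :
    ((if se then [((-2 : Int), "embargo")] else []) ++ pvLseq f c 0).Nodup := by
  have hpw : ((if se then [((-2 : Int), "embargo")] else []) ++ pvLseq f c 0).Pairwise
      (fun p q : Int × String => p.1 < q.1) := by
    rw [List.pairwise_append]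
    refine ⟨by split <;> simp, pvLseq_pairwise f c (f - 0).toNat 0 rfl, ?_⟩
    intro p hp q hq
    have hq' := pvLseq_key_lb f c (f - 0).toNat 0 rfl q hq
    split at hp
    · rw [List.mem_singleton] at hp
      subst hp
      simp only
      omega
    · simp at hp
  exact hpw.imp (fun {a b} h he => absurd (he ▸ h) (lt_irrefl _))

theorem pv_sorted_eq (f : Int) (se : Bool) (c : List Int)
    (hnd : c.Nodup) (hb : ∀ k ∈ c, 0 ≤ k ∧ k < f) :
    PySem.List.sorted (pvI f se c) (fun p => p.1) false
      = (if se then [((-2 : Int), "embargo")] else []) ++ pvLseq f c 0 := by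
  apply PySem.List.sorted_eq_of_perm_of_pairwise_lt
  · rw [List.perm_ext_iff_of_nodup (pvL_nodup f se c hb) (pvI_nodup f se c hnd hb)]
    intro p
    exact (pv_mem_I_iff f se c hb p).symm
  · rw [List.pairwise_append]
    refine ⟨by split <;> simp, pvLseq_pairwise f c (f - 0).toNat 0 rfl, ?_⟩
    intro p hp q hq
    have hq' := pvLseq_key_lb f c (f - 0).toNat 0 rfl q hq
    split at hp
    · rw [List.mem_singleton] at hp
      subst hp
      simp only
      omega
    · simp at hp

theorem pvVseq_step (f : Int) (c : List Int) (a : Int) (hf : a < f) :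
    pvVseq f c a = (if pvSep c a then ["embargo"] else []) ++ pvLbl c a :: pvVseq f c (a + 1) := by
  rw [pvVseq, pvLseq, if_pos hf]
  by_cases h : pvSep c a = true <;> simp [h, pvVseq]

theorem pvVseq_base (f : Int) (c : List Int) (a : Int) (hf : ¬ a < f) :
    pvVseq f c a = (if c.contains (f - 1) && a == f then ["embargo"] else []) := by
  rw [pvVseq, pvLseq_base f c a hf]
  cases hg : (c.contains (f - 1) && a == f) <;> simp [hg]

-- structural purge agrees with B's direct emission
theorem pv_wp_gq (f : Int) (c : List Int) :
    ∀ (n : Nat) (a : Int) (prev : String), (f - a).toNat = n → a ≤ f →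
    ((prev = "test") ↔ c.contains (a - 1) = true) →
    pvWp prev (pvVseq f c a) = pvGq f c a := by
  intro n
  induction n with
  | zero =>
    intro a prev ha haf _
    have hnf : ¬ a < f := by omega
    rw [pvVseq_base f c a hnf, pvGq, if_neg hnf]
    split
    · rfl
    · rfl
  | succ n ih =>
    intro a prev ha haf hprev
    have hf : a < f := by omega
    rw [pvVseq_step f c a hf, pvGq, if_pos hf]
    have hlblE : (pvLbl c a == "embargo") = false := by
      rw [pvLbl]; split <;> rfl
    have hlblT : (pvLbl c a == "test") = c.contains a := by
      rw [pvLbl]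
      cases h : c.contains a <;> simp [h]
    have hprevT : (prev == "test") = c.contains (a - 1) := by
      cases h : c.contains (a - 1)
      · have hne : prev ≠ "test" := fun hp => by
          have h2 := hprev.1 hp
          rw [h] at h2
          cases h2
        simp [hne]
      · simp [hprev.2 h]
    have hrec : pvWp (pvLbl c a) (pvVseq f c (a + 1)) = pvGq f c (a + 1) := by
      apply ih (a + 1) (pvLbl c a) (by omega) (by omega)
      rw [pvLbl]
      have he : a + 1 - 1 = a := by omega
      rw [he]
      cases h : c.contains a <;> simp [h]
    by_cases hsep : pvSep c a = true
    · rw [if_pos hsep, List.singleton_append]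
      have e1 : pvWp prev ("embargo" :: pvLbl c a :: pvVseq f c (a + 1))
          = (if prev == "test" && ("embargo" == "embargo") && (pvLbl c a == "test") then []
             else ["embargo"]) ++ pvWp "embargo" (pvLbl c a :: pvVseq f c (a + 1)) := rfl
      rw [e1, pvWp_keep "embargo" (pvLbl c a) hlblE, hrec, hprevT, hlblT]
      rw [pvSep] at hsep
      cases h1 : c.contains (a - 1) <;> cases h2 : c.contains a
      · rw [h1, h2] at hsep
        simp at hsep
      · simp [h1, h2]
      · simp [h1, h2]
      · simp [h1, h2]
    · rw [if_neg hsep, List.nil_append]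
      rw [pvWp_keep prev (pvLbl c a) hlblE, hrec]
      rw [pvSep] at hsep
      simp only [Bool.or_eq_true, not_or, Bool.not_eq_true] at hsep
      have e1 : (c.contains (a - 1) != c.contains a) = false := by
        rw [hsep.1, hsep.2]
        rfl
      rw [e1]
      simp

-- A's index-filter purge equals the structural window purge, from position s on
theorem pvWp_cons_cons (prev x y : String) (r : List String) :
    pvWp prev (x :: y :: r)
      = (if prev == "test" && (x == "embargo") && (y == "test") then [] else [x]) ++ pvWp x (y :: r) := rfl

theorem pv_filter_wp (S : List String) :
    ∀ (n s : Nat) (prev : String), S.length - s = n →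
    ((prev = "test") ↔ (1 ≤ s ∧ S.getD (s - 1) "" = "test")) →
    ((List.range' s n).filter (fun i =>
        !(decide (1 ≤ i) && (S.getD (i - 1) "" == "test") && decide (i + 1 < S.length)
            && (S.getD i "" == "embargo") && (S.getD (i + 1) "" == "test"))
        && !(decide (i + 1 = S.length) && (S.getD i "" == "embargo")))).map (fun i => S.getD i "")
      = pvWp prev (S.drop s) := by
  intro n
  induction n with
  | zero =>
    intro s prev hn _
    have hs : S.length ≤ s := by omega
    rw [List.drop_eq_nil_of_le hs]
    simp [pvWp]
  | succ n ih =>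
    intro s prev hn hprev
    have hs : s < S.length := by omega
    have hgds : S.getD s "" = S[s] := List.getD_eq_getElem S "" hs
    have hb1 : (decide (1 ≤ s) && (S.getD (s - 1) "" == "test")) = (prev == "test") := by
      by_cases h1 : 1 ≤ s
      · by_cases h2 : S.getD (s - 1) "" = "test"
        · have h3 := hprev.2 ⟨h1, h2⟩
          have e1 : (S.getD (s - 1) "" == "test") = true := by rw [h2]; rfl
          have e2 : (prev == "test") = true := by rw [h3]; rfl
          rw [e1, e2, Bool.and_true]
          simp [h1]
        · have hne : prev ≠ "test" := fun hp => h2 (hprev.1 hp).2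
          have e1 : (S.getD (s - 1) "" == "test") = false := beq_eq_false_iff_ne.mpr h2
          have e2 : (prev == "test") = false := beq_eq_false_iff_ne.mpr hne
          rw [e1, e2, Bool.and_false]
      · have hne : prev ≠ "test" := fun hp => h1 (hprev.1 hp).1
        have e1 : decide (1 ≤ s) = false := decide_eq_false h1
        have e2 : (prev == "test") = false := beq_eq_false_iff_ne.mpr hne
        rw [e1, e2, Bool.false_and]
    by_cases hlast : s + 1 = S.length
    · have hn0 : n = 0 := by omega
      subst hn0
      have hdropS : S.drop s = [S.getD s ""] := by
        rw [List.drop_eq_getElem_cons hs, List.drop_eq_nil_of_le (by omega), hgds]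
      have hchain : (decide (1 ≤ s) && (S.getD (s - 1) "" == "test") && decide (s + 1 < S.length)
          && (S.getD s "" == "embargo") && (S.getD (s + 1) "" == "test")) = false := by
        have h4 : decide (s + 1 < S.length) = false := by
          simp only [decide_eq_false_iff_not]
          omega
        simp [h4]
      have htrd : decide (s + 1 = S.length) = true := by simp [hlast]
      rw [hdropS]
      simp only [List.range'_succ, List.range'_zero, List.filter_cons, List.filter_nil]
      rw [hchain, htrd]
      have eW : pvWp prev [S.getD s ""] = if (S.getD s "" == "embargo") then [] else [S.getD s ""] := rfl
      rw [eW]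
      cases hE : (S.getD s "" == "embargo")
      · simp
      · simp
    · have h2' : s + 1 < S.length := by omega
      have hgds1 : S.getD (s + 1) "" = S[s + 1] := List.getD_eq_getElem S "" h2'
      have ihs := ih (s + 1) (S.getD s "") (by omega)
        ⟨fun h => ⟨by omega, by simpa using h⟩, fun h => h.2⟩
      have hdrop1 : S.drop s = S.getD s "" :: S.drop (s + 1) := by
        rw [List.drop_eq_getElem_cons hs, hgds]
      have hdrop2 : S.drop (s + 1) = S.getD (s + 1) "" :: S.drop (s + 2) := by
        rw [List.drop_eq_getElem_cons h2', hgds1]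
      rw [hdrop1, hdrop2, pvWp_cons_cons, ← hdrop2]
      have hchain : (decide (1 ≤ s) && (S.getD (s - 1) "" == "test") && decide (s + 1 < S.length)
          && (S.getD s "" == "embargo") && (S.getD (s + 1) "" == "test"))
          = ((prev == "test") && (S.getD s "" == "embargo") && (S.getD (s + 1) "" == "test")) := by
        rw [hb1]
        have h4 : decide (s + 1 < S.length) = true := by simp [h2']
        rw [h4, Bool.and_true]
      have htb : (decide (s + 1 = S.length) && (S.getD s "" == "embargo")) = false := by
        have h5 : decide (s + 1 = S.length) = false := by simp [hlast]
        rw [h5, Bool.false_and]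
      simp only [List.range'_succ, List.filter_cons]
      rw [hchain, htb]
      cases hb : ((prev == "test") && (S.getD s "" == "embargo") && (S.getD (s + 1) "" == "test"))
      · simp only [Bool.not_false, Bool.and_self, ↓reduceIte, List.map_cons, Bool.false_eq_true,
          List.singleton_append]
        rw [ihs]
      · simp only [Bool.not_true, Bool.not_false, Bool.false_and, Bool.and_false,
          Bool.false_eq_true, ↓reduceIte, List.nil_append]
        rw [ihs]


theorem pv_purged_mem (vals : List String) (lead : List Nat) (k : Nat) :
    ((if vals.getD (vals.length - 1) "" == "embargo"
        then pvPurgeLoop vals 0 lead ++ [vals.length - 1]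
        else pvPurgeLoop vals 0 lead).contains k = true) ↔
      (k ∈ lead ∨
       (∃ j, j + 2 < vals.length ∧ vals.getD j "" = "test" ∧ vals.getD (j + 1) "" = "embargo" ∧
          vals.getD (j + 2) "" = "test" ∧ k = j + 1) ∨
       (vals.getD (vals.length - 1) "" = "embargo" ∧ k = vals.length - 1)) := by
  have hloop := pvPurgeLoop_mem vals 0 lead k
  cases hE : (vals.getD (vals.length - 1) "" == "embargo")
  · simp only [Bool.false_eq_true, ↓reduceIte]
    have hc : (pvPurgeLoop vals 0 lead).contains k = true ↔ k ∈ pvPurgeLoop vals 0 lead := by simp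
    rw [hc, hloop]
    constructor
    · rintro (h | ⟨j, _, h2, h3, h4, h5, rfl⟩)
      · exact Or.inl h
      · exact Or.inr (Or.inl ⟨j, h2, h3, h4, h5, rfl⟩)
    · rintro (h | ⟨j, h2, h3, h4, h5, rfl⟩ | ⟨hE2, rfl⟩)
      · exact Or.inl h
      · exact Or.inr ⟨j, by omega, h2, h3, h4, h5, rfl⟩
      · exact absurd hE2 (beq_eq_false_iff_ne.mp hE)
  · simp only [↓reduceIte]
    have hc : ((pvPurgeLoop vals 0 lead ++ [vals.length - 1]).contains k = true)
        ↔ (k ∈ pvPurgeLoop vals 0 lead ∨ k = vals.length - 1) := by simp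
    rw [hc, hloop]
    constructor
    · rintro ((h | ⟨j, _, h2, h3, h4, h5, rfl⟩) | h)
      · exact Or.inl h
      · exact Or.inr (Or.inl ⟨j, h2, h3, h4, h5, rfl⟩)
      · exact Or.inr (Or.inr ⟨beq_iff_eq.mp hE, h⟩)
    · rintro (h | ⟨j, h2, h3, h4, h5, rfl⟩ | ⟨_, rfl⟩)
      · exact Or.inl (Or.inl h)
      · exact Or.inl (Or.inr ⟨j, by omega, h2, h3, h4, h5, rfl⟩)
      · exact Or.inr rfl

theorem pv_keep_eq (vals : List String) (lead : List Nat) (s : Nat) (prev : String)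
    (hs : s ≤ vals.length)
    (hprev : (prev = "test") ↔ (1 ≤ s ∧ vals.getD (s - 1) "" = "test"))
    (hlead : ∀ k : Nat, k ∈ lead ↔ k < s) :
    ((List.range vals.length).filter (fun k =>
        !((if vals.getD (vals.length - 1) "" == "embargo"
            then pvPurgeLoop vals 0 lead ++ [vals.length - 1]
            else pvPurgeLoop vals 0 lead).contains k))).map (fun k => vals.getD k "")
      = pvWp prev (vals.drop s) := by
  rw [List.range_eq_range']
  have hsplit : List.range' 0 vals.length = List.range' 0 s ++ List.range' s (vals.length - s) := by
    have h := @List.range'_append 0 s (vals.length - s) 1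
    simp only [Nat.one_mul, Nat.zero_add] at h
    have h2 : s + (vals.length - s) = vals.length := by omega
    calc List.range' 0 vals.length = List.range' 0 (s + (vals.length - s)) := by rw [h2]
      _ = List.range' 0 s ++ List.range' s (vals.length - s) := h.symm
  rw [hsplit, List.filter_append, List.map_append]
  have h1 : (List.range' 0 s).filter (fun k =>
      !((if vals.getD (vals.length - 1) "" == "embargo"
          then pvPurgeLoop vals 0 lead ++ [vals.length - 1]
          else pvPurgeLoop vals 0 lead).contains k)) = [] := by
    apply List.filter_eq_nil_iff.2
    intro k hk
    have hks : k < s := by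
      have := List.mem_range'_1.mp hk
      omega
    have hcc := (pv_purged_mem vals lead k).2 (Or.inl ((hlead k).2 hks))
    rw [hcc]
    simp
  rw [h1, List.map_nil, List.nil_append]
  rw [List.filter_congr (q := (fun i =>
        !(decide (1 ≤ i) && (vals.getD (i - 1) "" == "test") && decide (i + 1 < vals.length)
            && (vals.getD i "" == "embargo") && (vals.getD (i + 1) "" == "test"))
        && !(decide (i + 1 = vals.length) && (vals.getD i "" == "embargo")))) ?hq]
  · exact pv_filter_wp vals (vals.length - s) s prev rfl hprev
  case hq =>
    intro k hk
    have hks : s ≤ k ∧ k < vals.length := by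
      have := List.mem_range'_1.mp hk
      omega
    have e : ((if vals.getD (vals.length - 1) "" == "embargo"
          then pvPurgeLoop vals 0 lead ++ [vals.length - 1]
          else pvPurgeLoop vals 0 lead).contains k)
        = ((decide (1 ≤ k) && (vals.getD (k - 1) "" == "test") && decide (k + 1 < vals.length)
            && (vals.getD k "" == "embargo") && (vals.getD (k + 1) "" == "test"))
          || (decide (k + 1 = vals.length) && (vals.getD k "" == "embargo"))) := by
      rw [Bool.eq_iff_iff]
      rw [pv_purged_mem vals lead k]
      rw [Bool.or_eq_true]
      simp only [Bool.and_eq_true, beq_iff_eq, decide_eq_true_eq]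
      constructor
      · rintro (h | ⟨j, h2, h3, h4, h5, rfl⟩ | ⟨h6, rfl⟩)
        · exact absurd ((hlead k).1 h) (by omega)
        · exact Or.inl ⟨⟨⟨⟨by omega, by simpa using h3⟩, by omega⟩, h4⟩, h5⟩
        · exact Or.inr ⟨by omega, h6⟩
      · rintro (⟨⟨⟨⟨hk1, ht⟩, hk2⟩, he⟩, ht2⟩ | ⟨hk1, he⟩)
        · refine Or.inr (Or.inl ⟨k - 1, by omega, ht, ?_, ?_, by omega⟩)
          · rw [show k - 1 + 1 = k from by omega]
            exact he
          · rw [show k - 1 + 2 = k + 1 from by omega]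
            exact ht2
        · refine Or.inr (Or.inr ⟨?_, by omega⟩)
          rw [show vals.length - 1 = k from by omega]
          exact he
    rw [e, Bool.not_or]

theorem pv_flatMap_gq (f : Int) (c : List Int) :
    ∀ (n : Nat) (a : Int), (f - a).toNat = n → 1 ≤ a →
    ((PySem.List.pyRange a f 1).flatMap (fun j =>
        (if decide (0 < j) && (c.contains (j - 1) != c.contains j) then ["embargo"] else []) ++
        [if c.contains j then "test" else "train"]))
      = pvGq f c a := by
  intro n
  induction n with
  | zero =>
    intro a ha h1
    rw [PySem.List.pyRange_one_eq_nil (by omega), pvGq, if_neg (by omega)]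
    rfl
  | succ n ih =>
    intro a ha h1
    have hf : a < f := by omega
    rw [PySem.List.pyRange_one_cons hf, List.flatMap_cons, ih (a + 1) (by omega) (by omega)]
    conv_rhs => rw [pvGq]
    rw [if_pos hf]
    have hd : decide (0 < a) = true := by
      simp only [decide_eq_true_eq]
      omega
    rw [hd, Bool.true_and]
    rw [show (if c.contains a then "test" else "train") = pvLbl c a from rfl]
    simp [List.append_assoc]

theorem pv_parts_eq (f : Int) (se : Bool) (c : List Int) (hf : 1 ≤ f)
    (hc : c.Sublist (PySem.List.pyRange 0 f 1)) :
    pvPartsA f se c = pvPartsB f se c := by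
  have hnd : c.Nodup := (PySem.List.nodup_pyRange_one 0 f).sublist hc
  have hb : ∀ k ∈ c, 0 ≤ k ∧ k < f := fun k hk => PySem.List.mem_pyRange_one.1 (hc.subset hk)
  have hcm1 : c.contains (0 - 1) = false := by
    rw [← Bool.not_eq_true]
    intro h
    have hm : (0 - 1 : Int) ∈ c := by simpa using h
    have := (hb _ hm).1
    omega
  have hsep0 : pvSep c 0 = c.contains 0 := by
    rw [pvSep, hcm1, Bool.or_false]
  have hV0 := pvVseq_step f c 0 (by omega)
  simp only [pvPartsA, pvPartsB]
  rw [pv_d4_items f se c hnd hb, pv_sorted_eq f se c hnd hb, List.map_append]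
  rw [show List.map Prod.snd (if se then [((-2 : Int), "embargo")] else [])
      = (if se then ["embargo"] else []) from by cases se <;> rfl]
  rw [← pvVseq]
  rw [PySem.List.foldl_append_eq_flatMap]
  rw [PySem.List.pyRange_one_cons (show (0 : Int) < f from by omega), List.flatMap_cons,
    show (0 : Int) + 1 = 1 from by norm_num,
    pv_flatMap_gq f c (f - 1).toNat 1 rfl (by omega)]
  rw [show ((if decide ((0 : Int) < 0) && (c.contains (0 - 1) != c.contains 0) then ["embargo"] else []) ++
      [if c.contains 0 then "test" else "train"]) = [pvLbl c 0] from by rw [pvLbl]; simp]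
  congr 1
  have hGq0 : pvGq f c 0 = (if c.contains (0 - 1) != c.contains 0 then ["embargo"] else []) ++
      pvLbl c 0 :: pvGq f c 1 := by
    rw [pvGq, if_pos (show (0 : Int) < f from by omega)]
    norm_num
  have hprevE : (("" : String) = "test") ↔ c.contains (0 - 1) = true :=
    ⟨fun h => absurd h (by decide), fun h => absurd h (by rw [hcm1]; decide)⟩
  have hprevEm : (("embargo" : String) = "test") ↔ c.contains (0 - 1) = true :=
    ⟨fun h => absurd h (by decide), fun h => absurd h (by rw [hcm1]; decide)⟩
  cases hse : se
  · -- no start embargo: S = pvVseq f c 0, nothing purged at the front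
    simp only [Bool.false_eq_true, Bool.false_or, ↓reduceIte, List.nil_append]
    have hlen : 0 ≤ (pvVseq f c 0).length := by omega
    have hcond : ((pvVseq f c 0).getD 0 "" == "embargo" && (pvVseq f c 0).getD 1 "" == "embargo") = false := by
      cases h0 : c.contains 0
      · rw [hV0, hsep0, h0, pvLbl, h0]
        rfl
      · rw [hV0, hsep0, h0, pvLbl, h0]
        rfl
    rw [hcond]
    simp only [Bool.false_eq_true, ↓reduceIte]
    rw [pv_keep_eq (pvVseq f c 0) [] 0 "" (by omega)
      ⟨fun h => absurd h (by decide), fun h => absurd h.1 (by omega)⟩ (by intro k; simp)]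
    rw [List.drop_zero]
    rw [pv_wp_gq f c (f - 0).toNat 0 "" rfl (by omega) hprevE]
    rw [hGq0, hcm1]
    cases h0 : c.contains 0 <;> rfl
  · -- start embargo: S = "embargo" :: pvVseq f c 0
    simp only [Bool.true_or, ↓reduceIte, List.singleton_append]
    cases h0 : c.contains 0
    · -- fold 0 train: leading embargo is alone, kept
      have hlbl0 : pvLbl c 0 = "train" := by rw [pvLbl, h0]; rfl
      have hV0' : pvVseq f c 0 = "train" :: pvVseq f c 1 := by
        rw [hV0, hsep0, h0, hlbl0]
        rfl
      have hS : ("embargo" :: pvVseq f c 0 : List String) = "embargo" :: "train" :: pvVseq f c 1 := by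
        rw [hV0']
      rw [hS]
      have hcond : (("embargo" :: "train" :: pvVseq f c 1).getD 0 "" == "embargo"
          && ("embargo" :: "train" :: pvVseq f c 1).getD 1 "" == "embargo") = false := rfl
      rw [hcond]
      simp only [Bool.false_eq_true, ↓reduceIte]
      rw [pv_keep_eq ("embargo" :: "train" :: pvVseq f c 1) [] 0 "" (by omega)
        ⟨fun h => absurd h (by decide), fun h => absurd h.1 (by omega)⟩ (by intro k; simp)]
      rw [List.drop_zero, pvWp_cons_cons]
      rw [show ((("" : String) == "test") && (("embargo" : String) == "embargo")
          && (("train" : String) == "test")) = false from rfl]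
      simp only [Bool.false_eq_true, ↓reduceIte]
      rw [← hV0']
      rw [pv_wp_gq f c (f - 0).toNat 0 "embargo" rfl (by omega) hprevEm]
      rw [hGq0, hcm1, h0, hlbl0]
      rfl
    · -- fold 0 test: S = embargo, embargo, test, …; index 0 is purged
      have hlbl0 : pvLbl c 0 = "test" := by rw [pvLbl, h0]; rfl
      have hV0' : pvVseq f c 0 = "embargo" :: "test" :: pvVseq f c 1 := by
        rw [hV0, hsep0, h0, hlbl0]
        rfl
      have hS : ("embargo" :: pvVseq f c 0 : List String)
          = "embargo" :: "embargo" :: "test" :: pvVseq f c 1 := by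
        rw [hV0']
      rw [hS]
      have hcond : (("embargo" :: "embargo" :: "test" :: pvVseq f c 1).getD 0 "" == "embargo"
          && ("embargo" :: "embargo" :: "test" :: pvVseq f c 1).getD 1 "" == "embargo") = true := rfl
      rw [hcond]
      simp only [↓reduceIte]
      have hcond2 : (("embargo" :: "embargo" :: "test" :: pvVseq f c 1).getD 2 "" == "embargo") = false := rfl
      rw [hcond2]
      simp only [Bool.false_eq_true, ↓reduceIte]
      rw [pv_keep_eq ("embargo" :: "embargo" :: "test" :: pvVseq f c 1) [0] 1 "embargo"
        (by simp)
        ⟨fun h => absurd h (by decide), fun h => by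
          have hx := h.2
          simp at hx⟩
        (by intro k; simp [Nat.lt_one_iff])]
      rw [show ("embargo" :: "embargo" :: "test" :: pvVseq f c 1).drop 1
          = "embargo" :: "test" :: pvVseq f c 1 from rfl]
      rw [← hV0']
      rw [pv_wp_gq f c (f - 0).toNat 0 "embargo" rfl (by omega) hprevEm]
      rw [hGq0, hcm1, h0, hlbl0]
      rfl


-- ===== VERDICT (by name: the statement is the Claim_ definition above) =====
theorem cpcv_split_spec : Claim_equal_cpcv_split := by
  unfold Claim_equal_cpcv_split Spec_cpcv_split
  intro folds tf se _ hpre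
  obtain ⟨hf, ht0, htf⟩ := hpre
  rw [cpcv_split, cpcv_split_alt, if_neg (by omega), if_neg (by omega)]
  apply List.map_congr_left
  intro c hcm
  exact pv_parts_eq folds se c hf (pvCombos_sublist _ _ c hcm)
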